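-- pv_equiv track=rewrite | github.com/pypi-data/pypi-mirror-396 | packages/pybiotk/pybiotk-1.3.3.tar.gz/pybiotk-1.3.3/src/pybiotk/utils/utils.py | cigar_tuples2blocks
-- ===== SOURCE A (Python) =====
-- from typing import List, Dict, Sequence, Tuple, Literal, Iterator, Iterable, Optional, Callable, Union, TextIO
--
-- def cigar_tuples2blocks(start: int, cigartuples: Sequence[Tuple[int, int]], shift: int = 0) -> List[Tuple[int, int]]:
--     tmp_abs_start = shift + start
--     blocks = []
--     for cigar, length in cigartuples:
--         if cigar in [0, 2]:
--             blocks.append((tmp_abs_start, tmp_abs_start + length))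
--             tmp_abs_start += length
--         elif cigar in [3, 6, 10]:
--             tmp_abs_start += length
--     merged_blocks = []
--     tmp_start = None
--     block_num = len(blocks)
--     for i in range(block_num):
--         if tmp_start is None:
--             tmp_start = blocks[i][0]
--         if not ((i < block_num - 1) and (blocks[i + 1][0] <= blocks[i][1])):
--             merged_blocks.append((tmp_start, blocks[i][1]))
--             tmp_start = None
--     return merged_blocks
-- ===== SOURCE B (Python) =====
-- def cigar_tuples2blocks(start, cigartuples, shift=0):
--     pos = shift + start
--     merged = []
--     cur = None  # currently open (start, end) interval
--     for cigar, length in cigartuples: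
--         if cigar in (0, 2):
--             if cur is not None and pos <= cur[1]:
--                 cur = (cur[0], pos + length)
--             else:
--                 if cur is not None:
--                     merged.append(cur)
--                 cur = (pos, pos + length)
--             pos += length
--         elif cigar in (3, 6, 10):
--             pos += length
--     if cur is not None:
--         merged.append(cur)
--     return merged
-- ===== Notes on version B (the rewrite author's own statement) =====
-- stated objective: simpler
-- what changed: Replaces A's two-pass build-a-blocks-list-then-merge-with-index-look-ahead by a single pass that maintains one open interval (start, end) alongside the cursor and flushes it when the next block does not touch it.
import Mathlib
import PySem

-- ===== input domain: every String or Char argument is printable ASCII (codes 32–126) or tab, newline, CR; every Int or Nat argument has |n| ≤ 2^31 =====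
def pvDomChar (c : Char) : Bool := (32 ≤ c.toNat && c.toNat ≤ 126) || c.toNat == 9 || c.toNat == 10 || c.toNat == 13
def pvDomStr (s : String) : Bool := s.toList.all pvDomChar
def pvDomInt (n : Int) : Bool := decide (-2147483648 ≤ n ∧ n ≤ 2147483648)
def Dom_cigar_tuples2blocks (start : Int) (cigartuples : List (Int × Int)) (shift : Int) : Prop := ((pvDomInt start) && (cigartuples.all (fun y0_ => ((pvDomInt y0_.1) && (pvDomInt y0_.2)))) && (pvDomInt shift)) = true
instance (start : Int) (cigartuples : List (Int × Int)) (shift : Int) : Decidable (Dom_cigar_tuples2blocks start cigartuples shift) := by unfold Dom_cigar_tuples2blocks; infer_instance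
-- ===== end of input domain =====

-- B replaces A's build-then-merge two-pass structure by one pass that maintains a single open
-- interval; objective: simpler (no intermediate blocks list, no index look-ahead loop).

-- ===== PORT A =====
-- body of A's first loop (build the blocks list while advancing the cursor)
def buildStep (st : List (Int × Int) × Int) (ct : Int × Int) : List (Int × Int) × Int :=
  if ct.1 = 0 ∨ ct.1 = 2 then (st.1 ++ [(st.2, st.2 + ct.2)], st.2 + ct.2)
  else if ct.1 = 3 ∨ ct.1 = 6 ∨ ct.1 = 10 then (st.1, st.2 + ct.2)
  else st

-- body of A's second loop (state = (merged_blocks, tmp_start)); blocks[i]/blocks[i+1] are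
-- only read at in-range indices, so pyGetD with a dummy default is exact here
def mergeStepA (blocks : List (Int × Int)) (block_num : Int) (st : List (Int × Int) × Option Int) (i : Int) : List (Int × Int) × Option Int :=
  let tmp_start := st.2.getD ((PySem.List.pyGetD blocks i (0, 0)).1)
  if ¬ (i < block_num - 1 ∧ (PySem.List.pyGetD blocks (i + 1) (0, 0)).1 ≤ (PySem.List.pyGetD blocks i (0, 0)).2)
  then (st.1 ++ [(tmp_start, (PySem.List.pyGetD blocks i (0, 0)).2)], none)
  else (st.1, some tmp_start)

def cigar_tuples2blocks (start : Int) (cigartuples : List (Int × Int)) (shift : Int) : List (Int × Int) :=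
  let st1 := cigartuples.foldl buildStep ([], shift + start)
  let blocks := st1.1
  let block_num : Int := blocks.length
  ((PySem.List.pyRange 0 block_num).foldl (mergeStepA blocks block_num) ([], none)).1

-- ===== PORT B =====
-- body of B's single loop (state = (cursor, merged output, currently open interval))
def altStep (st : Int × List (Int × Int) × Option (Int × Int)) (ct : Int × Int) : Int × List (Int × Int) × Option (Int × Int) :=
  if ct.1 = 0 ∨ ct.1 = 2 then
    match st.2.2 with
    | some c =>
      if st.1 ≤ c.2 then (st.1 + ct.2, st.2.1, some (c.1, st.1 + ct.2))
      else (st.1 + ct.2, st.2.1 ++ [c], some (st.1, st.1 + ct.2))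
    | none => (st.1 + ct.2, st.2.1, some (st.1, st.1 + ct.2))
  else if ct.1 = 3 ∨ ct.1 = 6 ∨ ct.1 = 10 then (st.1 + ct.2, st.2.1, st.2.2)
  else st

def cigar_tuples2blocks_alt (start : Int) (cigartuples : List (Int × Int)) (shift : Int) : List (Int × Int) :=
  let st := cigartuples.foldl altStep (shift + start, [], none)
  match st.2.2 with
  | some c => st.2.1 ++ [c]
  | none => st.2.1

-- ===== PRECONDITION & SPEC =====
def Spec_cigar_tuples2blocks (start : Int) (cigartuples : List (Int × Int)) (shift : Int) (out : List (Int × Int)) : Prop := out = cigar_tuples2blocks_alt start cigartuples shift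
instance (start : Int) (cigartuples : List (Int × Int)) (shift : Int) (out : List (Int × Int)) : Decidable (Spec_cigar_tuples2blocks start cigartuples shift out) := by unfold Spec_cigar_tuples2blocks; infer_instance

-- ===== CLAIM (what is proved, stated in full; the proofs are below) =====
def Claim_equal_cigar_tuples2blocks : Prop := ∀ (start : Int) (cigartuples : List (Int × Int)) (shift : Int), Dom_cigar_tuples2blocks start cigartuples shift → Spec_cigar_tuples2blocks start cigartuples shift (cigar_tuples2blocks start cigartuples shift)

-- ===== LEMMAS AND PROOFS =====

-- blocks produced by A's first loop, as a structural recursion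
def blocksOf (pos : Int) : List (Int × Int) → List (Int × Int)
  | [] => []
  | ct :: r =>
    if ct.1 = 0 ∨ ct.1 = 2 then (pos, pos + ct.2) :: blocksOf (pos + ct.2) r
    else if ct.1 = 3 ∨ ct.1 = 6 ∨ ct.1 = 10 then blocksOf (pos + ct.2) r
    else blocksOf pos r

-- merge step over one block (the merge part of B's loop body)
def stepM (st : List (Int × Int) × Option (Int × Int)) (b : Int × Int) : List (Int × Int) × Option (Int × Int) :=
  match st.2 with
  | some c => if b.1 ≤ c.2 then (st.1, some (c.1, b.2)) else (st.1 ++ [c], some b)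
  | none => (st.1, some b)

-- structural merge keeping the open interval (B's merge, recursion form)
def mergeFrom (cur : Option (Int × Int)) : List (Int × Int) → List (Int × Int)
  | [] => match cur with | some c => [c] | none => []
  | b :: r =>
    match cur with
    | none => mergeFrom (some b) r
    | some c => if b.1 ≤ c.2 then mergeFrom (some (c.1, b.2)) r
                else c :: mergeFrom (some b) r

-- structural look-ahead merge (A's second loop, recursion form)
def mergeLA : Option Int → List (Int × Int) → List (Int × Int)
  | _, [] => []
  | ts, [b] => [(ts.getD b.1, b.2)]
  | ts, b :: b' :: r =>
    if b'.1 ≤ b.2 then mergeLA (some (ts.getD b.1)) (b' :: r)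
    else (ts.getD b.1, b.2) :: mergeLA none (b' :: r)

theorem blocks_fold_eq (cts : List (Int × Int)) : ∀ (bs : List (Int × Int)) (pos : Int),
    (cts.foldl buildStep (bs, pos)).1 = bs ++ blocksOf pos cts := by
  induction cts with
  | nil => intro bs pos; simp [blocksOf]
  | cons ct r ih =>
    intro bs pos
    by_cases h1 : ct.1 = 0 ∨ ct.1 = 2
    · simp [List.foldl_cons, buildStep, h1, blocksOf, ih]
    · by_cases h2 : ct.1 = 3 ∨ ct.1 = 6 ∨ ct.1 = 10
      · simp [List.foldl_cons, buildStep, h1, h2, blocksOf, ih]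
      · simp [List.foldl_cons, buildStep, h1, h2, blocksOf, ih]

theorem alt_fold_eq (cts : List (Int × Int)) : ∀ (pos : Int) (m : List (Int × Int)) (cur : Option (Int × Int)),
    (cts.foldl altStep (pos, m, cur)).2 = (blocksOf pos cts).foldl stepM (m, cur) := by
  induction cts with
  | nil => intro pos m cur; simp [blocksOf]
  | cons ct r ih =>
    intro pos m cur
    by_cases h1 : ct.1 = 0 ∨ ct.1 = 2
    · cases cur with
      | none => simp [List.foldl_cons, altStep, h1, blocksOf, stepM, ih]
      | some c =>
        by_cases hle : pos ≤ c.2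
        · simp [List.foldl_cons, altStep, h1, blocksOf, stepM, hle, ih]
        · simp [List.foldl_cons, altStep, h1, blocksOf, stepM, hle, ih]
    · by_cases h2 : ct.1 = 3 ∨ ct.1 = 6 ∨ ct.1 = 10
      · simp [List.foldl_cons, altStep, h1, h2, blocksOf, ih]
      · simp [List.foldl_cons, altStep, h1, h2, blocksOf, ih]

theorem flush_foldl_stepM (bs : List (Int × Int)) : ∀ (m : List (Int × Int)) (cur : Option (Int × Int)),
    (match (bs.foldl stepM (m, cur)).2 with
     | some c => (bs.foldl stepM (m, cur)).1 ++ [c]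
     | none => (bs.foldl stepM (m, cur)).1) = m ++ mergeFrom cur bs := by
  induction bs with
  | nil => intro m cur; cases cur <;> simp [mergeFrom]
  | cons b r ih =>
    intro m cur
    cases cur with
    | none => simp only [List.foldl_cons, stepM, mergeFrom]; exact ih m (some b)
    | some c =>
      by_cases hle : b.1 ≤ c.2
      · simp only [List.foldl_cons, stepM, mergeFrom, hle, if_pos]
        exact ih m (some (c.1, b.2))
      · simp only [List.foldl_cons, stepM, mergeFrom, hle, if_false]
        rw [ih (m ++ [c]) (some b)]
        simp
    
theorem mergeLA_none_step (b : Int × Int) (r : List (Int × Int)) :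
    mergeLA none (b :: r) = mergeLA (some b.1) (b :: r) := by
  cases r <;> simp [mergeLA]

theorem mergeLA_some_eq (r : List (Int × Int)) : ∀ (b : Int × Int) (s : Int),
    mergeLA (some s) (b :: r) = mergeFrom (some (s, b.2)) r := by
  induction r with
  | nil => intro b s; simp [mergeLA, mergeFrom]
  | cons b' r' ih =>
    intro b s
    by_cases hle : b'.1 ≤ b.2
    · simp only [mergeLA, mergeFrom, hle, Option.getD, if_pos]
      exact ih b' s
    · simp only [mergeLA, mergeFrom, hle, Option.getD, if_false]
      rw [mergeLA_none_step, ih b' b'.1]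

theorem mergeLA_eq_mergeFrom (bs : List (Int × Int)) : mergeLA none bs = mergeFrom none bs := by
  cases bs with
  | nil => rfl
  | cons b r => rw [mergeLA_none_step, mergeLA_some_eq, mergeFrom]

theorem mergeStepA_shift (b : Int × Int) (r : List (Int × Int)) (st : List (Int × Int) × Option Int) (k : Nat) :
    mergeStepA (b :: r) ((r.length + 1 : Nat) : Int) st ((Nat.succ k : Nat) : Int)
      = mergeStepA r (r.length : Int) st ((k : Nat) : Int) := by
  unfold mergeStepA
  have e1 : PySem.List.pyGetD (b :: r) ((Nat.succ k : Nat) : Int) (0, 0) = PySem.List.pyGetD r ((k : Nat) : Int) (0, 0) := by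
    rw [PySem.List.pyGetD_natCast, PySem.List.pyGetD_natCast]; rfl
  have e2 : PySem.List.pyGetD (b :: r) (((Nat.succ k : Nat) : Int) + 1) (0, 0) = PySem.List.pyGetD r (((k : Nat) : Int) + 1) (0, 0) := by
    have h1 : (((Nat.succ k : Nat) : Int) + 1) = ((k + 2 : Nat) : Int) := by push_cast; ring
    have h2 : (((k : Nat) : Int) + 1) = ((k + 1 : Nat) : Int) := by push_cast; ring
    rw [h1, h2, PySem.List.pyGetD_natCast, PySem.List.pyGetD_natCast]; rfl
  have e3 : (((Nat.succ k : Nat) : Int) < ((r.length + 1 : Nat) : Int) - 1) ↔ (((k : Nat) : Int) < (r.length : Int) - 1) := by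
    push_cast; omega
  rw [e1, e2]
  simp only [e3]

theorem index_fold_eq (bs : List (Int × Int)) : ∀ (acc : List (Int × Int)) (ts : Option Int),
    (List.foldl (fun (st : List (Int × Int) × Option Int) (k : Nat) => mergeStepA bs (bs.length : Int) st ((k : Nat) : Int))
      (acc, ts) (List.range bs.length)).1 = acc ++ mergeLA ts bs := by
  induction bs with
  | nil => intro acc ts; simp [mergeLA]
  | cons b r ih =>
    intro acc ts
    rw [List.length_cons, List.range_succ_eq_map, List.foldl_cons, List.foldl_map]
    rw [PySem.List.foldl_congr_mem (List.range r.length)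
        (fun (st : List (Int × Int) × Option Int) (k : Nat) => mergeStepA (b :: r) ((r.length + 1 : Nat) : Int) st ((Nat.succ k : Nat) : Int))
        (fun (st : List (Int × Int) × Option Int) (k : Nat) => mergeStepA r (r.length : Int) st ((k : Nat) : Int)) _
        (fun st k _ => mergeStepA_shift b r st k)]
    have hb0 : PySem.List.pyGetD (b :: r) (((0 : Nat) : Int)) (0, 0) = b := by
      rw [PySem.List.pyGetD_natCast]; rfl
    cases r with
    | nil =>
      simp [mergeStepA, mergeLA]
    | cons b' r' =>
      have hb1 : PySem.List.pyGetD (b :: b' :: r') ((((0 : Nat) : Int)) + 1) (0, 0) = b' := by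
        rw [show (((0 : Nat) : Int)) + 1 = ((1 : Nat) : Int) by norm_num, PySem.List.pyGetD_natCast]; rfl
      have hlt : (((0 : Nat) : Int)) < (((b' :: r').length + 1 : Nat) : Int) - 1 := by
        simp only [List.length_cons]; push_cast; omega
      by_cases hle : b'.1 ≤ b.2
      · rw [show mergeStepA (b :: b' :: r') (((b' :: r').length + 1 : Nat) : Int) (acc, ts) (((0 : Nat) : Int))
              = (acc, some (ts.getD b.1)) by
            unfold mergeStepA; rw [hb0, hb1, if_neg (by simp [hle])]]
        rw [ih acc (some (ts.getD b.1))]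
        cases ts <;> simp [mergeLA, hle]
      · rw [show mergeStepA (b :: b' :: r') (((b' :: r').length + 1 : Nat) : Int) (acc, ts) (((0 : Nat) : Int))
              = (acc ++ [(ts.getD b.1, b.2)], none) by
            unfold mergeStepA; rw [hb0, hb1, if_pos (by simp [hle])]]
        rw [ih (acc ++ [(ts.getD b.1, b.2)]) none]
        cases ts <;> simp [mergeLA, hle]

theorem merge_fold_eq (bs : List (Int × Int)) :
    ((PySem.List.pyRange 0 ((bs.length : Nat) : Int)).foldl (mergeStepA bs ((bs.length : Nat) : Int)) ([], none)).1
      = mergeLA none bs := by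
  rw [PySem.List.pyRange_zero_natCast, List.foldl_map]
  exact index_fold_eq bs [] none

-- ===== VERDICT (by name: the statement is the Claim_ definition above) =====
theorem cigar_tuples2blocks_spec : Claim_equal_cigar_tuples2blocks := by
  intro start cts shift _
  unfold Spec_cigar_tuples2blocks cigar_tuples2blocks cigar_tuples2blocks_alt
  dsimp only
  rw [blocks_fold_eq cts [] (shift + start), List.nil_append]
  rw [merge_fold_eq, alt_fold_eq, flush_foldl_stepM, mergeLA_eq_mergeFrom]
  simp
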